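-- pv_equiv track=rewrite | github.com/jumtra/agenda_maker | agenda_maker/model/segmentation/semantic_segmentation.py | _index_mapping
-- ===== SOURCE A (Python) =====
-- def _index_mapping(segment_map) -> list[int]:
--     """分割された文のインデックスをリストでまとめる"""
--     index_list = []
--     temp = []
--     for index, i in enumerate(segment_map):
--         if i == 1:
--             index_list.append(temp)
--             temp = [index]
--         else:
--             temp.append(index)
--     index_list.append(temp)
--     return index_list
-- ===== SOURCE B (Python) =====
-- def _index_mapping(segment_map) -> list[int]:
--     cuts = [i for i, v in enumerate(segment_map) if v == 1]
--     starts = [0] + cuts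
--     ends = cuts + [len(segment_map)]
--     return [list(range(s, e)) for s, e in zip(starts, ends)]
-- ===== Notes on version B (the rewrite author's own statement) =====
-- stated objective: alternative
-- what changed: Replaces the single-pass accumulate-and-flush loop with a boundary-table decomposition: collect the positions of the 1-markers, pair consecutive boundaries, and emit each segment as a contiguous index range.
import Mathlib
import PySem

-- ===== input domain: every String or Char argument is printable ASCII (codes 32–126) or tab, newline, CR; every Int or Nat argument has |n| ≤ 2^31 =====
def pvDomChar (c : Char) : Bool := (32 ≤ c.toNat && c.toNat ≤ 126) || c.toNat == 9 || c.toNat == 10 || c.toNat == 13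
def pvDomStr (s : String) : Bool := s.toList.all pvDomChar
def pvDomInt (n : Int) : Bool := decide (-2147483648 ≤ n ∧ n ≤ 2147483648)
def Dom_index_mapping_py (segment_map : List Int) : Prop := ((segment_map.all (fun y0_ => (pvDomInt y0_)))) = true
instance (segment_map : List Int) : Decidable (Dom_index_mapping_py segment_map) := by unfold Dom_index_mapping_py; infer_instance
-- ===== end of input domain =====

-- B replaces A's accumulate-and-flush loop with a boundary-position table and per-segment index ranges (alternative decomposition, same cost).


-- ===== PORT A =====
-- the for-loop over enumerate(segment_map) with state (index_list, temp)
def indexMappingGo : List (Int × Int) → List (List Int) → List Int → List (List Int)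
  | [], index_list, temp => index_list ++ [temp]
  | (index, i) :: rest, index_list, temp =>
    if i = 1 then indexMappingGo rest (index_list ++ [temp]) [index]
    else indexMappingGo rest index_list (temp ++ [index])

def index_mapping_py (segment_map : List Int) : List (List Int) :=
  indexMappingGo (PySem.List.enumerate segment_map 0) [] []

-- ===== PORT B =====
def index_mapping_py_alt (segment_map : List Int) : List (List Int) :=
  let cuts := (PySem.List.enumerate segment_map 0).filterMap
    (fun p => if p.2 = 1 then some p.1 else none)
  let starts := 0 :: cuts
  let ends := cuts ++ [(segment_map.length : Int)]
  (starts.zip ends).map (fun p => PySem.List.pyRange p.1 p.2 1)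

-- ===== PRECONDITION & SPEC =====
def Spec_index_mapping_py (segment_map : List Int) (out : List (List Int)) : Prop := out = index_mapping_py_alt segment_map
instance (segment_map : List Int) (out : List (List Int)) : Decidable (Spec_index_mapping_py segment_map out) := by unfold Spec_index_mapping_py; infer_instance

-- ===== CLAIM (what is proved, stated in full; the proofs are below) =====
def Claim_equal_index_mapping_py : Prop := ∀ (segment_map : List Int), Dom_index_mapping_py segment_map → Spec_index_mapping_py segment_map (index_mapping_py segment_map)

-- ===== LEMMAS AND PROOFS =====

-- cut positions of the tail starting at offset n
def pvCuts (xs : List Int) (n : Int) : List Int :=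
  (PySem.List.enumerate xs n).filterMap (fun p => if p.2 = 1 then some p.1 else none)

theorem pvCuts_nil (n : Int) : pvCuts [] n = [] := by
  simp [pvCuts, PySem.List.enumerate_nil]

theorem pvCuts_cons (x : Int) (xs : List Int) (n : Int) :
    pvCuts (x :: xs) n = if x = 1 then n :: pvCuts xs (n + 1) else pvCuts xs (n + 1) := by
  simp only [pvCuts, PySem.List.enumerate_cons, List.filterMap_cons]
  split_ifs <;> simp_all

-- loop invariant: A's loop from offset n with current temp = range(s, n) produces acc ++ B's range table
theorem indexMappingGo_eq (xs : List Int) : ∀ (n s : Int) (acc : List (List Int)), s ≤ n →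
    indexMappingGo (PySem.List.enumerate xs n) acc (PySem.List.pyRange s n 1) =
      acc ++ ((s :: pvCuts xs n).zip (pvCuts xs n ++ [n + xs.length])).map
        (fun p => PySem.List.pyRange p.1 p.2 1) := by
  induction xs with
  | nil =>
      intro n s acc _
      simp [PySem.List.enumerate_nil, indexMappingGo, pvCuts_nil]
  | cons x xs ih =>
      intro n s acc hsn
      rw [PySem.List.enumerate_cons, pvCuts_cons]
      by_cases hx : x = 1
      · simp only [hx, indexMappingGo]
        have h1 : [n] = PySem.List.pyRange n (n + 1) 1 := (PySem.List.pyRange_one_singleton n).symm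
        rw [h1, ih (n + 1) n (acc ++ [PySem.List.pyRange s n 1]) (by omega)]
        have harith : (n : Int) + 1 + (xs.length : Int) = n + ((xs.length : Int) + 1) := by ring
        simp only [List.length_cons, List.append_assoc, List.singleton_append,
          Nat.cast_add, Nat.cast_one, harith]
        simp [List.zip_cons_cons]
      · simp only [indexMappingGo, if_neg hx]
        have h2 : PySem.List.pyRange s n 1 ++ [n] = PySem.List.pyRange s (n + 1) 1 :=
          (PySem.List.pyRange_one_succ_right hsn).symm
        have harith : (n : Int) + 1 + (xs.length : Int) = n + ((xs.length : Int) + 1) := by ring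
        rw [h2, ih (n + 1) s acc (by omega)]
        simp only [List.length_cons, Nat.cast_add, Nat.cast_one, harith]

-- ===== VERDICT (by name: the statement is the Claim_ definition above) =====
theorem index_mapping_py_spec : Claim_equal_index_mapping_py := by
  intro xs _
  show index_mapping_py xs = index_mapping_py_alt xs
  have h0 : ([] : List Int) = PySem.List.pyRange 0 0 1 := by
    simp [PySem.List.pyRange_one_eq_nil]
  rw [index_mapping_py, h0, indexMappingGo_eq xs 0 0 [] le_rfl]
  simp [index_mapping_py_alt, pvCuts]
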